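-- pv_equiv track=rewrite | github.com/adcerros/AIInOrganizations | divideYvenceras/DivideAndConquerExamen.py | _imparMasGrande
-- ===== SOURCE A (Python) =====
-- def _imparMasGrande(lista, start, end):
--     if start == end:
--         if lista[start] % 2 != 0:
--             return lista[start]
--         else:
--             return None
--     else:
--         mid=(start+end)//2
--         num1 = _imparMasGrande(lista,start,mid)
--         num2 = _imparMasGrande(lista,mid+1,end)
--         if num1 == None:
--             return num2
--         if num2 == None:
--             return num1
--         return max(num1,num2)
-- ===== SOURCE B (Python) =====
-- def _imparMasGrande(lista, start, end):
--     mejor = None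
--     i = start
--     while True:
--         x = lista[i]
--         if x % 2 != 0:
--             mejor = x if mejor is None else max(mejor, x)
--         if i == end:
--             return mejor
--         i += 1
-- ===== Notes on version B (the rewrite author's own statement) =====
-- stated objective: simpler
-- what changed: replaces the recursive divide-and-conquer over index halves with a single iterative scan from start to end maintaining the running largest odd value
import Mathlib
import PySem

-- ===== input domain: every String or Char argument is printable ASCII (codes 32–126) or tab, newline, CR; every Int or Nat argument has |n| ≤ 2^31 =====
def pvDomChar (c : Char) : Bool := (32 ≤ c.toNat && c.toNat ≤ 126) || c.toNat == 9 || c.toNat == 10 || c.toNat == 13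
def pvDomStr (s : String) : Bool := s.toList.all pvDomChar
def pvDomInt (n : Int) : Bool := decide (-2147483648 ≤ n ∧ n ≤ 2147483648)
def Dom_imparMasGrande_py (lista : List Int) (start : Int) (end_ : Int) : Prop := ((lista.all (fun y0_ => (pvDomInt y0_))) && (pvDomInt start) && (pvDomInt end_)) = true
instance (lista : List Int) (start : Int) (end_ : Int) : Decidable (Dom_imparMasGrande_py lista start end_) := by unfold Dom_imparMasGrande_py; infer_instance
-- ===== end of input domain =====

-- B replaces A's recursive divide-and-conquer with a single iterative scan maintaining the running largest odd (simpler; same cost).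


-- ===== PORT A =====
-- Literal port of A's recursion; 'fuel' only makes the recursion total (Python diverges when start > end_,
-- which Pre_ excludes); inside Pre_ the fuel supplied below is never exhausted.
def imparAux (lista : List Int) : Int → Int → Nat → Option Int
  | _, _, 0 => none
  | start, end_, fuel + 1 =>
    if start = end_ then
      match PySem.List.pyGet? lista start with
      | some v => if PySem.Int.mod v 2 ≠ 0 then some v else none
      | none => none                       -- IndexError in Python; outside Pre_
    else
      let mid := PySem.Int.floordiv (start + end_) 2
      let num1 := imparAux lista start mid fuel
      let num2 := imparAux lista (mid + 1) end_ fuel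
      match num1 with
      | none => num2
      | some a =>
        match num2 with
        | none => some a
        | some b => some (max a b)

def imparMasGrande_py (lista : List Int) (start : Int) (end_ : Int) : Option Int :=
  imparAux lista start end_ ((end_ - start).toNat + 1)

-- ===== PORT B =====
-- Literal port of B's while-loop; 'fuel' only makes the loop total (inside Pre_ the loop runs
-- exactly (end_ - start).toNat + 1 times, so the fuel supplied below is never exhausted).
def altAux (lista : List Int) (end_ : Int) : Int → Option Int → Nat → Option Int
  | _, mejor, 0 => mejor
  | i, mejor, f + 1 =>
    match PySem.List.pyGet? lista i with
    | none => mejor                        -- IndexError in Python; outside Pre_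
    | some x =>
      let mejor := if PySem.Int.mod x 2 ≠ 0 then
          match mejor with
          | none => some x
          | some b => some (max b x)
        else mejor
      if i = end_ then mejor else altAux lista end_ (i + 1) mejor f

def imparMasGrande_py_alt (lista : List Int) (start : Int) (end_ : Int) : Option Int :=
  altAux lista end_ start none ((end_ - start).toNat + 1)

-- ===== PRECONDITION & SPEC =====
-- Pre_ excludes exactly the inputs where the Pythons raise: start > end_ (A recurses forever,
-- RecursionError) and index ranges reaching outside [-len, len) (IndexError at a leaf).
def Pre_imparMasGrande_py (lista : List Int) (start : Int) (end_ : Int) : Prop :=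
  start ≤ end_ ∧ -(lista.length : Int) ≤ start ∧ end_ < (lista.length : Int)
instance (lista : List Int) (start : Int) (end_ : Int) : Decidable (Pre_imparMasGrande_py lista start end_) := by unfold Pre_imparMasGrande_py; infer_instance

def pvWitness_imparMasGrande_py : List Int × Int × Int := ([3, 4, 5], 0, 2)

def Spec_imparMasGrande_py (lista : List Int) (start : Int) (end_ : Int) (out : Option Int) : Prop := out = imparMasGrande_py_alt lista start end_
instance (lista : List Int) (start : Int) (end_ : Int) (out : Option Int) : Decidable (Spec_imparMasGrande_py lista start end_ out) := by unfold Spec_imparMasGrande_py; infer_instance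

-- ===== CLAIM (what is proved, stated in full; the proofs are below) =====
def Claim_equal_imparMasGrande_py : Prop := ∀ (lista : List Int) (start : Int) (end_ : Int), Dom_imparMasGrande_py lista start end_ → Pre_imparMasGrande_py lista start end_ → Spec_imparMasGrande_py lista start end_ (imparMasGrande_py lista start end_)

-- ===== LEMMAS AND PROOFS =====

-- A's three-way combination of the two recursive results.
def pvComb : Option Int → Option Int → Option Int
  | none, n2 => n2
  | some a, none => some a
  | some a, some b => some (max a b)

-- The value a single leaf / loop iteration contributes for index i.
def pvLeaf (lista : List Int) (i : Int) : Option Int :=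
  match PySem.List.pyGet? lista i with
  | some v => if PySem.Int.mod v 2 ≠ 0 then some v else none
  | none => none

-- one loop iteration's update of the running best, named.
def pvStep (lista : List Int) (best : Option Int) (i : Int) : Option Int :=
  match PySem.List.pyGet? lista i with
  | none => best
  | some x =>
    if PySem.Int.mod x 2 ≠ 0 then
      match best with
      | none => some x
      | some b => some (max b x)
    else best

theorem pvStep_eq (lista : List Int) (best : Option Int) (i : Int) :
    pvStep lista best i = pvComb best (pvLeaf lista i) := by
  unfold pvStep pvLeaf pvComb
  cases h : PySem.List.pyGet? lista i with
  | none => cases best <;> simp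
  | some x =>
    cases best <;> simp <;> split <;> simp [max_comm]

theorem pvComb_none_right (a : Option Int) : pvComb a none = a := by
  cases a <;> rfl

theorem pvComb_assoc (a b c : Option Int) : pvComb (pvComb a b) c = pvComb a (pvComb b c) := by
  cases a <;> cases b <;> cases c <;> simp [pvComb, max_assoc]

theorem pvFoldl_step (lista : List Int) (l : List Int) (a : Option Int) :
    l.foldl (pvStep lista) a = pvComb a (l.foldl (pvStep lista) none) := by
  induction l generalizing a with
  | nil => simp [pvComb_none_right]
  | cons i t ih =>
    simp only [List.foldl_cons]
    rw [ih (pvStep lista a i), ih (pvStep lista none i)]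
    rw [pvStep_eq, pvStep_eq, pvComb_assoc]
    rfl

theorem pvMain (lista : List Int) : ∀ (d : Nat), ∀ (start end_ : Int), start ≤ end_ →
    (end_ - start).toNat = d → ∀ fuel, d < fuel →
    imparAux lista start end_ fuel =
      (PySem.List.pyRange start (end_ + 1) 1).foldl (pvStep lista) none := by
  intro d
  induction d using Nat.strong_induction_on with
  | _ d ih =>
    intro start end_ hle hd fuel hfuel
    cases fuel with
    | zero => omega
    | succ f =>
      by_cases heq : start = end_
      · subst heq
        rw [PySem.List.pyRange_one_singleton]
        simp only [imparAux, List.foldl_cons, List.foldl_nil]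
        rw [pvStep_eq]
        unfold pvComb pvLeaf
        cases PySem.List.pyGet? lista start <;> simp
      · have hlt : start < end_ := lt_of_le_of_ne hle heq
        set mid := PySem.Int.floordiv (start + end_) 2 with hmid
        have hbounds := PySem.Int.floordiv_two_mid_bounds hle
        have hlo : start ≤ mid := hbounds.1
        have hhi : mid < end_ := by
          rw [hmid, PySem.Int.floordiv_lt_iff_lt_mul (by omega : (0:Int) < 2)]
          omega
        have h1 : imparAux lista start mid f =
            (PySem.List.pyRange start (mid + 1) 1).foldl (pvStep lista) none :=
          ih (mid - start).toNat (by omega) start mid hlo rfl f (by omega)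
        have h2 : imparAux lista (mid + 1) end_ f =
            (PySem.List.pyRange (mid + 1) (end_ + 1) 1).foldl (pvStep lista) none :=
          ih (end_ - (mid + 1)).toNat (by omega) (mid + 1) end_ (by omega) rfl f (by omega)
        have hsplit : PySem.List.pyRange start (end_ + 1) 1 =
            PySem.List.pyRange start (mid + 1) 1 ++ PySem.List.pyRange (mid + 1) (end_ + 1) 1 :=
          PySem.List.pyRange_one_append start (mid + 1) (end_ + 1) (by omega) (by omega)
        rw [hsplit, List.foldl_append, pvFoldl_step]
        simp only [imparAux, if_neg heq]
        rw [← hmid, h1, h2]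
        cases (PySem.List.pyRange start (mid + 1) 1).foldl (pvStep lista) none <;>
          cases (PySem.List.pyRange (mid + 1) (end_ + 1) 1).foldl (pvStep lista) none <;> rfl

theorem altAux_succ (lista : List Int) (end_ i : Int) (mejor : Option Int) (f : Nat) :
    altAux lista end_ i mejor (f + 1) =
      match PySem.List.pyGet? lista i with
      | none => mejor
      | some x =>
        let mejor := if PySem.Int.mod x 2 ≠ 0 then
            match mejor with
            | none => some x
            | some b => some (max b x)
          else mejor
        if i = end_ then mejor else altAux lista end_ (i + 1) mejor f := rfl

theorem pvAltMain (lista : List Int) (end_ : Int) (hlen : end_ < (lista.length : Int)) :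
    ∀ (d : Nat) (i : Int) (mejor : Option Int), i ≤ end_ → -(lista.length : Int) ≤ i →
    (end_ - i).toNat = d →
    altAux lista end_ i mejor (d + 1) =
      (PySem.List.pyRange i (end_ + 1) 1).foldl (pvStep lista) mejor := by
  intro d
  induction d with
  | zero =>
    intro i mejor hle hlo hd
    have hie : i = end_ := by omega
    subst hie
    obtain ⟨x, hx⟩ : ∃ x, PySem.List.pyGet? lista i = some x := by
      cases h : PySem.List.pyGet? lista i with
      | none =>
        rw [PySem.List.pyGet?_eq_none_iff] at h
        exact absurd (by simp [PySem.Raise.InRange]; omega) h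
      | some x => exact ⟨x, rfl⟩
    rw [PySem.List.pyRange_one_singleton]
    simp [altAux, hx, pvStep]
  | succ d ih =>
    intro i mejor hle hlo hd
    have hlt : i < end_ := by omega
    obtain ⟨x, hx⟩ : ∃ x, PySem.List.pyGet? lista i = some x := by
      cases h : PySem.List.pyGet? lista i with
      | none =>
        rw [PySem.List.pyGet?_eq_none_iff] at h
        exact absurd (by simp [PySem.Raise.InRange]; omega) h
      | some x => exact ⟨x, rfl⟩
    rw [PySem.List.pyRange_one_cons (by omega : i < end_ + 1), List.foldl_cons]
    rw [altAux_succ, hx]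
    simp only [if_neg (by omega : ¬ i = end_)]
    rw [ih (i + 1) _ (by omega) (by omega) (by omega)]
    congr 1
    simp [pvStep, hx]

-- ===== VERDICT (by name: the statement is the Claim_ definition above) =====
theorem imparMasGrande_py_spec : Claim_equal_imparMasGrande_py := by
  intro lista start end_ _ hpre
  obtain ⟨hle, hlo, hhi⟩ := hpre
  unfold Spec_imparMasGrande_py imparMasGrande_py imparMasGrande_py_alt
  rw [pvMain lista (end_ - start).toNat start end_ hle rfl ((end_ - start).toNat + 1) (by omega)]
  rw [pvAltMain lista end_ hhi (end_ - start).toNat start none hle hlo rfl]
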